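-- pv_equiv track=rewrite | github.com/PaddlePaddle/Paddle | paddle/phi/kernels/fusion/cutlass/memory_efficient_attention/generate_kernels.py | find_arch_range
-- ===== SOURCE A (Python) =====
-- DEFAULT_ARCH = [50, 70, 75, 80]
--
-- MAX_ARCH = 90
--
-- def find_arch_range(min_arch, max_arch):
--     assert min_arch >= DEFAULT_ARCH[0] and min_arch <= MAX_ARCH
--     assert max_arch >= DEFAULT_ARCH[0] and max_arch <= MAX_ARCH
--     assert min_arch <= max_arch
--     n = len(DEFAULT_ARCH)
--
--     start_idx = n - 1
--     for i in range(n - 1):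
--         if DEFAULT_ARCH[i] <= min_arch and min_arch < DEFAULT_ARCH[i + 1]:
--             start_idx = i
--             break
--
--     end_idx = n
--     for i in range(n - 1):
--         if DEFAULT_ARCH[i] <= max_arch and max_arch < DEFAULT_ARCH[i + 1]:
--             end_idx = i + 1
--
--     return DEFAULT_ARCH[start_idx:end_idx]
-- ===== SOURCE B (Python) =====
-- DEFAULT_ARCH = [50, 70, 75, 80]
--
-- MAX_ARCH = 90
--
-- def find_arch_range(min_arch, max_arch):
--     assert min_arch >= DEFAULT_ARCH[0] and min_arch <= MAX_ARCH
--     assert max_arch >= DEFAULT_ARCH[0] and max_arch <= MAX_ARCH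
--     assert min_arch <= max_arch
--     # rank-based: count thresholds passed instead of searching for a containing interval
--     start_idx = sum(1 for a in DEFAULT_ARCH if a <= min_arch) - 1
--     end_idx = sum(1 for a in DEFAULT_ARCH if a <= max_arch)
--     return DEFAULT_ARCH[start_idx:end_idx]
-- ===== Notes on version B (the rewrite author's own statement) =====
-- stated objective: simpler
-- what changed: Replaces the two interval-search loops (find i with ARCH[i] <= x < ARCH[i+1], with break/default sentinels) by direct rank computation: each index is the count of DEFAULT_ARCH entries <= the bound (minus one for the start), then one slice.
import Mathlib
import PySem

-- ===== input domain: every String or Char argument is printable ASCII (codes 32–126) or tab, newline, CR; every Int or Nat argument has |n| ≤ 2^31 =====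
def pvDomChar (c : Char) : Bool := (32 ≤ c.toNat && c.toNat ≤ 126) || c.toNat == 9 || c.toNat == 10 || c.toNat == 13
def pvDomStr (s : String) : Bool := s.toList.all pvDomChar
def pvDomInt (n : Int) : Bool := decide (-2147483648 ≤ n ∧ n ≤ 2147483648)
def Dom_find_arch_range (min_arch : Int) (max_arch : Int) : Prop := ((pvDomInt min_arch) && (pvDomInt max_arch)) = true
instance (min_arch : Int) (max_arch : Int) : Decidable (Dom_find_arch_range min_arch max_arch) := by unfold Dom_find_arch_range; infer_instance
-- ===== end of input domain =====

-- B replaces the two interval-search loops by rank counting (count of arch entries ≤ bound); same asserts, same result.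
-- ===== PORT A =====
def find_arch_range (min_arch : Int) (max_arch : Int) : List Int :=
  let arch : List Int := [50, 70, 75, 80]
  let n : Int := 4
  -- first loop, with break (carried as a Bool flag)
  let start_idx : Int :=
    ((PySem.List.pyRange 0 (n - 1) 1).foldl
      (fun (st : Int × Bool) i =>
        if st.2 then st
        else if PySem.List.pyGetD arch i 0 ≤ min_arch ∧ min_arch < PySem.List.pyGetD arch (i + 1) 0
        then (i, true) else st)
      (n - 1, false)).1
  -- second loop, no break
  let end_idx : Int :=
    (PySem.List.pyRange 0 (n - 1) 1).foldl
      (fun (e : Int) i =>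
        if PySem.List.pyGetD arch i 0 ≤ max_arch ∧ max_arch < PySem.List.pyGetD arch (i + 1) 0
        then i + 1 else e)
      n
  PySem.List.slice arch (some start_idx) (some end_idx)

-- ===== PORT B =====
def find_arch_range_alt (min_arch : Int) (max_arch : Int) : List Int :=
  let arch : List Int := [50, 70, 75, 80]
  let start_idx : Int := (arch.countP (fun a => decide (a ≤ min_arch)) : Int) - 1
  let end_idx : Int := (arch.countP (fun a => decide (a ≤ max_arch)) : Int)
  PySem.List.slice arch (some start_idx) (some end_idx)

-- ===== PRECONDITION & SPEC =====
-- Pre_ excludes exactly the inputs on which A's three asserts raise AssertionError.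
def Pre_find_arch_range (min_arch : Int) (max_arch : Int) : Prop :=
  50 ≤ min_arch ∧ min_arch ≤ 90 ∧ 50 ≤ max_arch ∧ max_arch ≤ 90 ∧ min_arch ≤ max_arch
instance (min_arch : Int) (max_arch : Int) : Decidable (Pre_find_arch_range min_arch max_arch) := by
  unfold Pre_find_arch_range; infer_instance
def pvWitness_find_arch_range : Int × Int := (70, 80)

def Spec_find_arch_range (min_arch : Int) (max_arch : Int) (out : List Int) : Prop := out = find_arch_range_alt min_arch max_arch
instance (min_arch : Int) (max_arch : Int) (out : List Int) : Decidable (Spec_find_arch_range min_arch max_arch out) := by unfold Spec_find_arch_range; infer_instance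

-- ===== CLAIM (what is proved, stated in full; the proofs are below) =====
def Claim_equal_find_arch_range : Prop := ∀ (min_arch : Int) (max_arch : Int), Dom_find_arch_range min_arch max_arch → Pre_find_arch_range min_arch max_arch → Spec_find_arch_range min_arch max_arch (find_arch_range min_arch max_arch)

-- ===== LEMMAS AND PROOFS =====

-- ===== VERDICT (by name: the statement is the Claim_ definition above) =====
theorem find_arch_range_spec : Claim_equal_find_arch_range := by
  intro mn mx _ hpre
  obtain ⟨h1, h2, h3, h4, h5⟩ := hpre
  unfold Spec_find_arch_range
  interval_cases mn <;> interval_cases mx <;> decide
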